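-- pv_equiv track=rewrite | github.com/plat320/SS_cote | 1859.py | find_max_idx
-- ===== SOURCE A (Python) =====
-- import copy
--
-- def find_max_idx(my_list):
--     max_idx_list = []
--     tmp_list = copy.deepcopy(my_list)
--
--     while True:
--         max_value = max(tmp_list)
--         # subtarget_list = find_all_idx(my_list, max_value)
--         # max_idx = subtarget_list[-1]
--         max_idx = len(my_list) - list(reversed(my_list)).index(max_value) - 1
--         max_idx_list.append(max_idx)
--         tmp_list = my_list[max_idx+1:]
--
--         #### break condition
--         if max_idx == len(my_list) - 1:
--             break
--
--     return max_idx_list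
-- ===== SOURCE B (Python) =====
-- def find_max_idx(my_list):
--     # single right-to-left pass: an index is kept iff its value is strictly
--     # greater than everything to its right (running maximum), then reverse
--     res = []
--     best = None
--     for i, v in reversed(list(enumerate(my_list))):
--         if best is None or v > best:
--             res.append(i)
--             best = v
--     res.reverse()
--     return res
-- ===== Notes on version B (the rewrite author's own statement) =====
-- stated objective: faster
-- what changed: replaces the repeated max()+reversed().index() rescans of suffixes by a single right-to-left scan keeping a running maximum (the result is exactly the indices whose value strictly exceeds everything to their right)
-- crash fix: on the empty list A raises ValueError from max(()); B returns [] — e.g. on find_max_idx([]): A raises ValueError, B returns []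
import Mathlib
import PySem

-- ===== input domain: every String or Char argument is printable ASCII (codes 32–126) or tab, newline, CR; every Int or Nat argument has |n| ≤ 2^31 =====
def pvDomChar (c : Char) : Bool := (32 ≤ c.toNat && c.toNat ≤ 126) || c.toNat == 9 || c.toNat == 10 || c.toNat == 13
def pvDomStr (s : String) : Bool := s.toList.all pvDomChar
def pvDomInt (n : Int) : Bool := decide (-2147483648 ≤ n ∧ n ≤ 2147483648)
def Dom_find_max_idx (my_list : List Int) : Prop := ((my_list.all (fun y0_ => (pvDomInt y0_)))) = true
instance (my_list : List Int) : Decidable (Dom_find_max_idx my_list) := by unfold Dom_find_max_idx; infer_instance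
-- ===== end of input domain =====

-- B replaces A's repeated max()+reversed().index() suffix rescans by a single
-- right-to-left running-maximum scan; same return value on every nonempty list.

-- ===== PORT A =====
-- the 'while True' loop; fuel = length + 1 is always enough (each iteration strictly
-- advances the suffix start); the 'none' branches are where Python raises (empty max /
-- value not found), unreachable under Pre_.
def pvALoop (xs : List Int) : Nat → List Int → List Int → List Int
  | 0, _, acc => acc
  | fuel + 1, tmp, acc =>
    match PySem.List.max? tmp (fun y => y) with
    | none => acc
    | some mv =>
      match PySem.List.index? xs.reverse mv with
      | none => acc
      | some r =>
        let mi : Int := (xs.length : Int) - (r : Int) - 1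
        if mi = (xs.length : Int) - 1 then acc ++ [mi]
        else pvALoop xs fuel (PySem.List.slice xs (some (mi + 1)) none) (acc ++ [mi])

def find_max_idx (my_list : List Int) : List Int :=
  pvALoop my_list (my_list.length + 1) my_list []

-- ===== PORT B =====
def pvBeats (best : Option Int) (v : Int) : Bool :=
  match best with
  | none => true
  | some b => decide (b < v)

-- the 'for i, v in reversed(list(enumerate(my_list)))' loop of Source B
def pvBGo : List (Int × Int) → Option Int → List Int → List Int
  | [], _, res => res
  | (i, v) :: rest, best, res =>
    if pvBeats best v then pvBGo rest (some v) (res ++ [i])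
    else pvBGo rest best res

def find_max_idx_alt (my_list : List Int) : List Int :=
  (pvBGo (PySem.List.enumerate my_list).reverse none []).reverse

-- ===== PRECONDITION & SPEC =====
-- Pre_ excludes only the empty list, on which A raises ValueError (max of an empty sequence).
def Pre_find_max_idx (my_list : List Int) : Prop := my_list ≠ []
instance (my_list : List Int) : Decidable (Pre_find_max_idx my_list) := by unfold Pre_find_max_idx; infer_instance
def pvWitness_find_max_idx : List Int := [1, 0, 2, 1]

-- on the empty list A raises ValueError from max(()); B returns []
def Raises_find_max_idx (my_list : List Int) : Prop := my_list = []
instance (my_list : List Int) : Decidable (Raises_find_max_idx my_list) := by unfold Raises_find_max_idx; infer_instance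
def pvRaiseWitness_find_max_idx : List Int := []
def pvRaiseWitnessOut_find_max_idx : List Int := []

def Spec_find_max_idx (my_list : List Int) (out : List Int) : Prop := out = find_max_idx_alt my_list
instance (my_list : List Int) (out : List Int) : Decidable (Spec_find_max_idx my_list out) := by unfold Spec_find_max_idx; infer_instance

-- ===== CLAIM (what is proved, stated in full; the proofs are below) =====
def Claim_equal_find_max_idx : Prop := ∀ (my_list : List Int), Dom_find_max_idx my_list → Pre_find_max_idx my_list → Spec_find_max_idx my_list (find_max_idx my_list)
def Claim_raises_find_max_idx : Prop := (∀ (my_list : List Int), Dom_find_max_idx my_list → Raises_find_max_idx my_list → ¬ Pre_find_max_idx my_list) ∧ (Dom_find_max_idx (pvRaiseWitness_find_max_idx) ∧ Raises_find_max_idx (pvRaiseWitness_find_max_idx) ∧ find_max_idx_alt (pvRaiseWitness_find_max_idx) = pvRaiseWitnessOut_find_max_idx)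

-- ===== LEMMAS AND PROOFS =====

-- 'i is a strict leader of xs': xs[i] strictly exceeds every later element
def pvIsLead (xs : List Int) (i : Nat) : Bool :=
  (xs.drop (i + 1)).all (fun y => decide (y < xs.getD i 0))

-- ascending list of strict-leader indices ≥ s (A's loop emits exactly these)
def pvAL (xs : List Int) (s : Nat) : List Int :=
  ((List.range xs.length).filter (fun i => s ≤ i && pvIsLead xs i)).map (fun i => Int.ofNat i)

-- leaders that additionally beat a threshold (the running best of B's scan)
def pvALb (xs : List Int) (b : Option Int) : List Int :=
  ((List.range xs.length).filter (fun i => pvBeats b (xs.getD i 0) && pvIsLead xs i)).map (fun i => Int.ofNat i)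

theorem pvBGo_acc (zs : List (Int × Int)) (best : Option Int) (res : List Int) :
    pvBGo zs best res = res ++ pvBGo zs best [] := by
  induction zs generalizing best res with
  | nil => simp [pvBGo]
  | cons p rest ih =>
    obtain ⟨i, v⟩ := p
    by_cases h : pvBeats best v = true
    · rw [pvBGo, pvBGo, if_pos h, if_pos h, ih _ (res ++ [i]), ih _ ([] ++ [i])]
      simp
    · rw [pvBGo, pvBGo, if_neg h, if_neg h]; exact ih _ _

theorem pvBeats_split (b : Option Int) (a v : Int) :
    (pvBeats b v && decide (a < v)) = pvBeats (if pvBeats b a then some a else b) v := by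
  cases b with
  | none => simp [pvBeats]
  | some b0 =>
    by_cases h : b0 < a <;> simp [pvBeats, h] <;> omega

theorem pvALb_append (zs : List Int) (a : Int) (b : Option Int) :
    pvALb (zs ++ [a]) b =
      pvALb zs (if pvBeats b a then some a else b) ++ (if pvBeats b a then [Int.ofNat zs.length] else []) := by
  unfold pvALb
  rw [show (zs ++ [a]).length = zs.length + 1 by simp, List.range_succ, List.filter_append,
    List.map_append]
  congr 1
  · -- prefix part
    rw [List.filter_congr (q := fun i => pvBeats (if pvBeats b a then some a else b) (zs.getD i 0) && pvIsLead zs i)]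
    intro i hi
    rw [List.mem_range] at hi
    have hgd : (zs ++ [a]).getD i 0 = zs.getD i 0 := by
      rw [List.getD_eq_getElem _ _ (by simp; omega), List.getD_eq_getElem _ _ hi, List.getElem_append_left hi]
    have hlead : pvIsLead (zs ++ [a]) i = (pvIsLead zs i && decide (a < zs.getD i 0)) := by
      unfold pvIsLead
      rw [List.drop_append_of_le_length (by omega), List.all_append, hgd]
      simp
    rw [hgd, hlead, ← pvBeats_split]
    cases pvBeats b (zs.getD i 0) <;> cases pvIsLead zs i <;> cases decide (a < zs.getD i 0) <;> rfl
  · -- the new last element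
    have hgd : (zs ++ [a]).getD zs.length 0 = a := by simp
    have hlead : pvIsLead (zs ++ [a]) zs.length = true := by
      unfold pvIsLead
      rw [List.drop_eq_nil_iff.mpr (by simp)]
      rfl
    by_cases h : pvBeats b a = true <;> simp [hlead, h]

theorem pvB_char (xs : List Int) (b : Option Int) :
    (pvBGo (PySem.List.enumerate xs).reverse b []).reverse = pvALb xs b := by
  induction xs using List.reverseRecOn generalizing b with
  | nil => simp [PySem.List.enumerate, pvBGo, pvALb]
  | append_singleton zs a ih =>
    rw [PySem.List.enumerate_append, List.reverse_append]
    have he : (PySem.List.enumerate [a] (0 + zs.length)).reverse = [((zs.length : Int), a)] := by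
      rw [PySem.List.enumerate_cons]; simp [PySem.List.enumerate]
    rw [he, List.singleton_append, pvBGo, pvALb_append]
    by_cases h : pvBeats b a = true
    · rw [if_pos h, if_pos h, if_pos h, pvBGo_acc, List.reverse_append, ih]
      simp
    · rw [if_neg h, if_neg h, if_neg h, ih]
      simp

theorem pvAL_eq_pvALb (xs : List Int) : pvALb xs none = pvAL xs 0 := by
  unfold pvALb pvAL pvBeats
  simp

theorem pvAL_ge_len (xs : List Int) : pvAL xs xs.length = [] := by
  unfold pvAL
  rw [List.filter_eq_nil_iff.mpr, List.map_nil]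
  intro i hi
  rw [List.mem_range] at hi
  simp; omega

theorem pvAL_step (xs : List Int) (s k : Nat) (hsk : s ≤ k) (hk : k < xs.length)
    (hlead : pvIsLead xs k = true)
    (hno : ∀ i, s ≤ i → i < k → pvIsLead xs i = false) :
    pvAL xs s = Int.ofNat k :: pvAL xs (k + 1) := by
  unfold pvAL
  rw [show xs.length = (k+1) + (xs.length - (k+1)) by omega, List.range_add,
    List.filter_append, List.filter_append, List.map_append, List.map_append]
  have h1 : List.filter (fun i => s ≤ i && pvIsLead xs i) (List.range (k+1)) = [k] := by
    rw [List.range_succ, List.filter_append,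
      List.filter_eq_nil_iff.mpr (by
        intro i hi
        rw [List.mem_range] at hi
        by_cases hs : s ≤ i
        · simp [hno i hs hi]
        · simp; omega)]
    simp [hsk, hlead]
  have h2 : List.filter (fun i => k+1 ≤ i && pvIsLead xs i) (List.range (k+1)) = [] := by
    apply List.filter_eq_nil_iff.mpr
    intro i hi
    rw [List.mem_range] at hi
    simp; omega
  have h3 : List.filter (fun i => s ≤ i && pvIsLead xs i) ((List.range (xs.length - (k+1))).map ((k+1) + ·))
      = List.filter (fun i => k+1 ≤ i && pvIsLead xs i) ((List.range (xs.length - (k+1))).map ((k+1) + ·)) := by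
    apply List.filter_congr
    intro i hi
    rw [List.mem_map] at hi
    obtain ⟨j, _, rfl⟩ := hi
    have hs : decide (s ≤ k + 1 + j) = true := by simp; omega
    have hk' : decide (k + 1 ≤ k + 1 + j) = true := by simp
    rw [hs, hk']
  rw [h1, h2, h3]
  simp

theorem pvA_char (xs : List Int) (fuel s : Nat) (acc : List Int)
    (hs : s < xs.length) (hfuel : xs.length - s ≤ fuel) :
    pvALoop xs fuel (xs.drop s) acc = acc ++ pvAL xs s := by
  induction fuel generalizing s acc with
  | zero => omega
  | succ fuel ih =>
    have hne : xs.drop s ≠ [] := by rw [ne_eq, List.drop_eq_nil_iff]; omega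
    obtain ⟨mv, hmax⟩ : ∃ mv, PySem.List.max? (xs.drop s) (fun y => y) = some mv := by
      cases hm : PySem.List.max? (xs.drop s) (fun y => y) with
      | none => exact absurd ((PySem.List.max?_eq_none_iff _ _).mp hm) hne
      | some mv => exact ⟨mv, rfl⟩
    have hmem : mv ∈ xs.drop s := PySem.List.max?_mem hmax
    have hmax' : ∀ y ∈ xs.drop s, y ≤ mv := fun y hy => PySem.List.max?_isMax hmax y hy
    have hmemrev : mv ∈ xs.reverse := by
      rw [List.mem_reverse]; exact List.mem_of_mem_drop hmem
    obtain ⟨r, hidx⟩ : ∃ r, PySem.List.index? xs.reverse mv = some r :=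
      Option.isSome_iff_exists.mp ((PySem.List.index?_isSome_iff _ _).mpr hmemrev)
    obtain ⟨hr, hval, hfirst⟩ := PySem.List.getElem_of_index?_eq_some hidx
    have hrn : r < xs.length := by simpa using hr
    have hkn : xs.length - 1 - r < xs.length := by omega
    set k := xs.length - 1 - r with hkdef
    have hxk : xs[k] = mv := by
      rw [← hval]; exact (List.getElem_reverse (by simpa using hrn)).symm
    have hafter_ne : ∀ j, k < j → (hj : j < xs.length) → xs[j] ≠ mv := by
      intro j hkj hj
      have hr' : xs.length - 1 - j < r := by omega
      have h := hfirst (xs.length - 1 - j) hr'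
      rw [List.getElem_reverse (by simp; omega)] at h
      simp only [show xs.length - 1 - (xs.length - 1 - j) = j from by omega] at h
      exact h
    have hs_le_k : s ≤ k := by
      obtain ⟨m, hm, hmv⟩ := List.mem_iff_getElem.mp hmem
      have hm' : s + m < xs.length := by simp at hm; omega
      have hxv : xs[s+m]'hm' = mv := by rw [← hmv]; simp
      by_contra h
      exact hafter_ne (s+m) (by omega) hm' hxv
    have hafter_lt : ∀ j, k < j → (hj : j < xs.length) → xs[j] < mv := by
      intro j hkj hj
      have hmem' : xs[j] ∈ xs.drop s := by
        rw [List.mem_iff_getElem]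
        refine ⟨j - s, by simp; omega, ?_⟩
        rw [List.getElem_drop]
        congr 1
        omega
      exact lt_of_le_of_ne (hmax' _ hmem') (hafter_ne j hkj hj)
    have hlead : pvIsLead xs k = true := by
      unfold pvIsLead
      rw [List.all_eq_true]
      intro y hy
      obtain ⟨m, hm, rfl⟩ := List.mem_iff_getElem.mp hy
      have hm' : k + 1 + m < xs.length := by simp at hm; omega
      rw [List.getElem_drop, List.getD_eq_getElem _ _ hkn, hxk]
      exact decide_eq_true (hafter_lt (k+1+m) (by omega) hm')
    have hno : ∀ i, s ≤ i → i < k → pvIsLead xs i = false := by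
      intro i hsi hik
      have hin : i < xs.length := by omega
      by_contra hcon
      rw [Bool.not_eq_false] at hcon
      unfold pvIsLead at hcon
      rw [List.all_eq_true] at hcon
      have hxkmem : xs[k] ∈ xs.drop (i+1) := by
        rw [List.mem_iff_getElem]
        refine ⟨k - (i+1), by simp; omega, ?_⟩
        rw [List.getElem_drop]
        congr 1
        omega
      have h1 := of_decide_eq_true (hcon _ hxkmem)
      rw [List.getD_eq_getElem _ _ hin, hxk] at h1
      have hximem : xs[i] ∈ xs.drop s := by
        rw [List.mem_iff_getElem]
        refine ⟨i - s, by simp; omega, ?_⟩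
        rw [List.getElem_drop]
        congr 1
        omega
      have h2 := hmax' _ hximem
      omega
    simp only [pvALoop, hmax, hidx]
    have hmi : (xs.length : Int) - (r : Int) - 1 = Int.ofNat k := by simp only [hkdef, Int.ofNat_eq_natCast]; omega
    by_cases hbreak : ((xs.length : Int) - (r : Int) - 1 = (xs.length : Int) - 1)
    · rw [if_pos hbreak, pvAL_step xs s k hs_le_k hkn hlead hno,
        show k + 1 = xs.length from by simp only [hkdef]; omega, pvAL_ge_len, hmi]
    · rw [if_neg hbreak]
      have hk1 : k + 1 < xs.length := by simp only [hkdef] at *; omega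
      have hslice : PySem.List.slice xs (some ((xs.length : Int) - (r : Int) - 1 + 1)) none = xs.drop (k+1) := by
        rw [show (xs.length : Int) - (r : Int) - 1 + 1 = (((k+1 : Nat) : Int)) by push_cast; omega]
        exact PySem.List.slice_from_natCast xs (k+1)
      rw [hslice, ih (k+1) _ hk1 (by omega), pvAL_step xs s k hs_le_k hkn hlead hno, hmi]
      simp

-- ===== VERDICT (by name: the statement is the Claim_ definition above) =====
theorem find_max_idx_spec : Claim_equal_find_max_idx := by
  intro xs _ hne
  have hne' : xs ≠ [] := hne
  unfold Spec_find_max_idx find_max_idx find_max_idx_alt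
  rw [pvB_char, pvAL_eq_pvALb]
  have hlen : 0 < xs.length := List.length_pos_iff.mpr hne'
  have h := pvA_char xs (xs.length + 1) 0 [] hlen (by omega)
  rw [List.drop_zero] at h
  rw [h, List.nil_append]

@[simp] theorem find_max_idx_raises : Claim_raises_find_max_idx := by
  unfold Claim_raises_find_max_idx
  exact ⟨fun l _ h hp => hp h, by decide⟩
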